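-- pv_equiv track=rewrite | github.com/FaultMaven/FaultMaven-Mono | faultmaven/services/agent.py | _needs_confirmation
-- ===== SOURCE A (Python) =====
-- def _needs_confirmation(agent_result: dict) -> bool:
--     """Check if the agent result indicates need for confirmation"""
--     # Look for confirmation keywords in recommendations
--     confirmation_keywords = ['confirm', 'verify', 'proceed', 'approve', 'authorize']
--
--     # Check recommendations only (as per test requirements)
--     recommendations = agent_result.get('recommendations', [])
--     if isinstance(recommendations, list):
--         for rec in recommendations:
--             if isinstance(rec, str):
--                 rec_lower = rec.lower()
--                 if any(keyword in rec_lower for keyword in confirmation_keywords):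
--                     return True
--
--     return False
-- ===== SOURCE B (Python) =====
-- # First-letter dispatch table built once: keyword tails keyed by their first character.
-- _KEYWORD_TAILS = {'c': ['onfirm'], 'v': ['erify'], 'p': ['roceed'], 'a': ['pprove', 'uthorize']}
--
--
-- def _scan(s):
--     """Position-wise scan: at each character, dispatch through the first-letter
--     table and test whether a candidate keyword tail starts right after it."""
--     for i, ch in enumerate(s):
--         for tail in _KEYWORD_TAILS.get(ch, []):
--             if s.startswith(tail, i + 1):
--                 return True
--     return False
--
--
-- def _needs_confirmation(agent_result: dict) -> bool:
--     """Check if the agent result indicates need for confirmation"""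
--     recommendations = agent_result.get('recommendations', [])
--     if not isinstance(recommendations, list):
--         return False
--     return any(isinstance(rec, str) and _scan(rec.lower()) for rec in recommendations)
-- ===== Notes on version B (the rewrite author's own statement) =====
-- stated objective: alternative
-- what changed: B drops the per-keyword substring-containment tests: it walks each lowercased recommendation character by character, dispatches the current character through a first-letter table to the candidate keyword tails, and checks one prefix match at that position, instead of A's loop running the 'in' substring search for every keyword against every recommendation.
import Mathlib
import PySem

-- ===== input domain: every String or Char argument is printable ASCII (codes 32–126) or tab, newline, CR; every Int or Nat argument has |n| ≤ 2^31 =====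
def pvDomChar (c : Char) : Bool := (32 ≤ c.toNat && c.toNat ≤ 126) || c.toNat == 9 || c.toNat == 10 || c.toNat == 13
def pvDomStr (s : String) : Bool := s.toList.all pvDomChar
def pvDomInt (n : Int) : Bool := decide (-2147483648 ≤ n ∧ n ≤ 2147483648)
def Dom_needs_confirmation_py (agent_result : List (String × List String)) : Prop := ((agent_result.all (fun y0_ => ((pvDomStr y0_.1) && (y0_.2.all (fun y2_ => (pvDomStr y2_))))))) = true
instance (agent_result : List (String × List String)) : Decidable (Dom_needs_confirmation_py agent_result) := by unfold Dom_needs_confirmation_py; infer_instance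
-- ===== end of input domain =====

-- B replaces A's per-keyword substring tests with a character-position scan dispatching through a
-- first-letter table to candidate keyword tails ('alternative': same cost, different mechanism).
-- Under the type convention agent_result : dict[str, list[str]], so the isinstance guards are always true.

-- ===== PORT A =====
-- confirmation_keywords of A
def pvKeywords : List String := ["confirm", "verify", "proceed", "approve", "authorize"]

-- the 'for rec in recommendations: … return True' loop of A
def pvScanRecs : List String → Bool
  | [] => false
  | r :: rest =>
    let recLower := PySem.Str.lower r
    if pvKeywords.any (fun kw => PySem.Str.isIn kw recLower) then true
    else pvScanRecs rest

def needs_confirmation_py (agent_result : List (String × List String)) : Bool :=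
  let recommendations := PySem.Dict.getD (PySem.Dict.mk agent_result) "recommendations" []
  pvScanRecs recommendations

-- ===== PORT B =====
-- _KEYWORD_TAILS of Source B (keyword tails keyed by first character)
def pvKeywordTails : PySem.Dict Char (List (List Char)) :=
  PySem.Dict.mk
    [('c', [['o','n','f','i','r','m']]),
     ('v', [['e','r','i','f','y']]),
     ('p', [['r','o','c','e','e','d']]),
     ('a', [['p','p','r','o','v','e'], ['u','t','h','o','r','i','z','e']])]

-- _scan of Source B: the loop over positions i is recursion over the suffixes of the char list;
-- s.startswith(tail, i+1) is exactly 'tail is a prefix of the suffix after the current char'.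
def pvScan : List Char → Bool
  | [] => false
  | ch :: rest =>
    if (PySem.Dict.getD pvKeywordTails ch []).any (fun tail => tail.isPrefixOf rest) then true
    else pvScan rest

def needs_confirmation_py_alt (agent_result : List (String × List String)) : Bool :=
  let recommendations := PySem.Dict.getD (PySem.Dict.mk agent_result) "recommendations" []
  recommendations.any (fun rec => pvScan (PySem.Str.lower rec).toList)

-- ===== PRECONDITION & SPEC =====
def Spec_needs_confirmation_py (agent_result : List (String × List String)) (out : Bool) : Prop := out = needs_confirmation_py_alt agent_result
instance (agent_result : List (String × List String)) (out : Bool) : Decidable (Spec_needs_confirmation_py agent_result out) := by unfold Spec_needs_confirmation_py; infer_instance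

-- ===== CLAIM (what is proved, stated in full; the proofs are below) =====
def Claim_equal_needs_confirmation_py : Prop := ∀ (agent_result : List (String × List String)), Dom_needs_confirmation_py agent_result → Spec_needs_confirmation_py agent_result (needs_confirmation_py agent_result)

-- ===== LEMMAS AND PROOFS =====

-- the first-letter dispatch finds a keyword tail after ch exactly when some keyword is a prefix of ch :: rest
theorem pv_dispatch (ch : Char) (rest : List Char) :
    ((PySem.Dict.getD pvKeywordTails ch []).any (fun tail => tail.isPrefixOf rest))
      = pvKeywords.any (fun kw => kw.toList.isPrefixOf (ch :: rest)) := by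
  by_cases h1 : ch = 'c'
  · subst h1; rfl
  by_cases h2 : ch = 'v'
  · subst h2; rfl
  by_cases h3 : ch = 'p'
  · subst h3; rfl
  by_cases h4 : ch = 'a'
  · subst h4; rfl
  simp [pvKeywordTails, pvKeywords, PySem.Dict.getD, PySem.Dict.get?,
        List.isPrefixOf, Ne.symm h1, Ne.symm h2, Ne.symm h3, Ne.symm h4]

-- B's position scan accepts a char list exactly when some keyword occurs in it
theorem pv_scan_eq_any (cs : List Char) :
    pvScan cs = pvKeywords.any (fun kw => PySem.Chars.isIn kw.toList cs) := by
  induction cs with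
  | nil => decide
  | cons ch rest ih =>
    simp only [pvScan, pv_dispatch]
    rw [Bool.eq_iff_iff]
    by_cases hm : pvKeywords.any (fun kw => kw.toList.isPrefixOf (ch :: rest)) = true
    · rw [if_pos hm]
      simp only [List.any_eq_true, List.isPrefixOf_iff_prefix] at hm ⊢
      obtain ⟨kw, hkw, hpre⟩ := hm
      simp only [true_iff]
      exact ⟨kw, hkw, (PySem.Chars.isIn_iff_infix _ _).mpr hpre.isInfix⟩
    · rw [if_neg hm, ih]
      simp only [List.any_eq_true, List.isPrefixOf_iff_prefix] at hm
      push Not at hm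
      simp only [List.any_eq_true]
      constructor
      · rintro ⟨kw, hkw, h⟩
        refine ⟨kw, hkw, ?_⟩
        rw [PySem.Chars.isIn_iff_infix] at h ⊢
        exact h.trans (List.suffix_cons ch rest).isInfix
      · rintro ⟨kw, hkw, h⟩
        rw [PySem.Chars.isIn_iff_infix, List.infix_cons_iff] at h
        rcases h with h | h
        · exact absurd h (hm kw hkw)
        · exact ⟨kw, hkw, (PySem.Chars.isIn_iff_infix _ _).mpr h⟩

-- A's loop is the disjunction over recommendations
theorem pv_scanRecs_eq_any (recs : List String) :
    pvScanRecs recs = recs.any (fun r => pvKeywords.any (fun kw => PySem.Str.isIn kw (PySem.Str.lower r))) := by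
  induction recs with
  | nil => rfl
  | cons r rest ih =>
    simp only [pvScanRecs, List.any_cons]
    rcases Bool.eq_false_or_eq_true (pvKeywords.any fun kw => PySem.Str.isIn kw (PySem.Str.lower r)) with h | h
    · rw [if_pos h, h, Bool.true_or]
    · rw [if_neg (fun ht => Bool.false_ne_true (h ▸ ht)), ih, h, Bool.false_or]

-- ===== VERDICT (by name: the statement is the Claim_ definition above) =====
theorem needs_confirmation_py_spec : Claim_equal_needs_confirmation_py := by
  intro agent_result _
  unfold Spec_needs_confirmation_py needs_confirmation_py needs_confirmation_py_alt
  rw [pv_scanRecs_eq_any]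
  refine congrArg _ (funext fun r => ?_)
  rw [pv_scan_eq_any]
  simp [PySem.Str.isIn_eq]
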